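-- pv_equiv track=rewrite | github.com/YoonKim1106/codetree-TILs | 240926/공약수의 유무/presence-or-absence-of-a-common-divisor.py | has_common_divisor
-- ===== SOURCE A (Python) =====
-- def has_common_divisor(a,b):
--     common_divisior = set()
--
--     for i in range(1,1921):
--         if 1920 % i == 0:
--             common_divisior.add(i)
--
--     for i in range(1,2881):
--         if 2880 % i == 0 and i in common_divisior and a <= i <= b:
--             return 1
--
--     return 0
-- ===== SOURCE B (Python) =====
-- def has_common_divisor(a, b):
--     # common divisors of 1920 and 2880 are exactly the divisors of gcd(1920, 2880)
--     g, r = 1920, 2880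
--     while r:
--         g, r = r, g % r
--     for i in range(1, g + 1):
--         if g % i == 0 and a <= i <= b:
--             return 1
--     return 0
-- ===== Notes on version B (the rewrite author's own statement) =====
-- stated objective: simpler
-- what changed: B replaces A's build-a-divisor-set-of-1920-then-intersect-while-scanning-1..2880 with a Euclidean gcd reduction (gcd(1920,2880)=960) followed by a single scan of 1..960 for a divisor of the gcd inside [a,b]; both costs are fixed constants, so no speed is claimed.
import Mathlib
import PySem

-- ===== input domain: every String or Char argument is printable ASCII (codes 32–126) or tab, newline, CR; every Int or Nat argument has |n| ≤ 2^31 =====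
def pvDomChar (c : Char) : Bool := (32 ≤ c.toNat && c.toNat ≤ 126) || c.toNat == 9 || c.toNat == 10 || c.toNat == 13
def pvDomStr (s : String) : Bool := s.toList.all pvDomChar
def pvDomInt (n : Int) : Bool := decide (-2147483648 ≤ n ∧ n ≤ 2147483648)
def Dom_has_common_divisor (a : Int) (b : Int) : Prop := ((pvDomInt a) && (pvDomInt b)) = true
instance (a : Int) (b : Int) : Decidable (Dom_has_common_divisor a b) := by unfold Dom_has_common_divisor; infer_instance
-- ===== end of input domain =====

-- B replaces A's divisor-set construction + 1..2880 intersection scan with a Euclidean gcd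
-- reduction (gcd(1920,2880)=960) followed by a single scan of 1..960 (simpler: one loop, no set).

-- ===== PORT A =====
-- the set built by A's first loop: {i ∈ 1..1920 | 1920 % i == 0}
def pvCommonA : PySem.Set Int :=
  (PySem.List.pyRange 1 1921 1).foldl
    (fun s i => if PySem.Int.mod 1920 i = 0 then PySem.Set.add s i else s) PySem.Set.empty

-- A's second loop: return 1 on the first i with 2880 % i == 0 and i in the set and a <= i <= b
def pvLoopA (a : Int) (b : Int) : List Int → Int
  | [] => 0
  | i :: rest =>
      if PySem.Int.mod 2880 i = 0 ∧ PySem.Set.contains pvCommonA i = true ∧ a ≤ i ∧ i ≤ b then 1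
      else pvLoopA a b rest

def has_common_divisor (a : Int) (b : Int) : Int :=
  pvLoopA a b (PySem.List.pyRange 1 2881 1)

-- ===== PORT B =====
-- B's while loop: g, r = r, g % r until r == 0 (Euclid)
def pvGcdB (g : Int) (r : Int) : Int :=
  if r = 0 then g else pvGcdB r (PySem.Int.mod g r)
termination_by r.natAbs
decreasing_by
  rcases lt_trichotomy r 0 with hr | hr | hr
  · have := PySem.Int.mod_neg_bounds g hr; omega
  · omega
  · have h1 := PySem.Int.mod_nonneg g hr; have h2 := PySem.Int.mod_lt g hr; omega

-- B's for loop over range(1, g+1)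
def pvLoopB (g : Int) (a : Int) (b : Int) : List Int → Int
  | [] => 0
  | i :: rest =>
      if PySem.Int.mod g i = 0 ∧ a ≤ i ∧ i ≤ b then 1
      else pvLoopB g a b rest

def has_common_divisor_alt (a : Int) (b : Int) : Int :=
  let g := pvGcdB 1920 2880
  pvLoopB g a b (PySem.List.pyRange 1 (g + 1) 1)

-- ===== PRECONDITION & SPEC =====
def Spec_has_common_divisor (a : Int) (b : Int) (out : Int) : Prop := out = has_common_divisor_alt a b
instance (a : Int) (b : Int) (out : Int) : Decidable (Spec_has_common_divisor a b out) := by unfold Spec_has_common_divisor; infer_instance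

-- ===== CLAIM (what is proved, stated in full; the proofs are below) =====
def Claim_equal_has_common_divisor : Prop := ∀ (a : Int) (b : Int), Dom_has_common_divisor a b → Spec_has_common_divisor a b (has_common_divisor a b)

-- ===== LEMMAS AND PROOFS =====

-- the divisors of 960 = the common divisors of 1920 and 2880, as a literal list
def pvDivs : List Int := [1, 2, 3, 4, 5, 6, 8, 10, 12, 15, 16, 20, 24, 30, 32, 40, 48, 60, 64, 80, 96, 120, 160, 192, 240, 320, 480, 960]

lemma pvLoopA_eq_filter (a b : Int) (l : List Int) :
    pvLoopA a b l =
      if (l.filter (fun i => decide (PySem.Int.mod 2880 i = 0 ∧ PySem.Set.contains pvCommonA i = true))).any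
           (fun i => decide (a ≤ i ∧ i ≤ b)) then 1 else 0 := by
  induction l with
  | nil => simp [pvLoopA]
  | cons i rest ih =>
      by_cases h1 : PySem.Int.mod 2880 i = 0
      · by_cases h2 : i ∈ pvCommonA
        · by_cases hr : a ≤ i ∧ i ≤ b
          · simp [pvLoopA, h1, h2, hr]
          · simp [pvLoopA, h1, h2, hr, ih]
        · simp [pvLoopA, h1, h2, ih]
      · simp [pvLoopA, h1, ih]

lemma pvLoopB_eq_filter (g a b : Int) (l : List Int) :
    pvLoopB g a b l =
      if (l.filter (fun i => decide (PySem.Int.mod g i = 0))).any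
           (fun i => decide (a ≤ i ∧ i ≤ b)) then 1 else 0 := by
  induction l with
  | nil => simp [pvLoopB]
  | cons i rest ih =>
      by_cases hq : PySem.Int.mod g i = 0
      · by_cases hr : a ≤ i ∧ i ≤ b
        · simp [pvLoopB, hq, hr]
        · simp [pvLoopB, hq, hr, ih]
      · simp [pvLoopB, hq, ih]

set_option maxRecDepth 40000 in
lemma pvFilterA :
    (PySem.List.pyRange 1 2881 1).filter
      (fun i => decide (PySem.Int.mod 2880 i = 0 ∧ PySem.Set.contains pvCommonA i = true)) = pvDivs := by
  decide

lemma pvGcdB_val : pvGcdB 1920 2880 = 960 := by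
  have h1 : PySem.Int.mod 1920 2880 = 1920 := by decide
  have h2 : PySem.Int.mod 2880 1920 = 960 := by decide
  have h3 : PySem.Int.mod 1920 960 = 0 := by decide
  rw [pvGcdB, if_neg (by norm_num : ¬ (2880 : Int) = 0), h1]
  rw [pvGcdB, if_neg (by norm_num : ¬ (1920 : Int) = 0), h2]
  rw [pvGcdB, if_neg (by norm_num : ¬ (960 : Int) = 0), h3]
  rw [pvGcdB, if_pos rfl]

set_option maxRecDepth 40000 in
lemma pvFilterB :
    (PySem.List.pyRange 1 961 1).filter
      (fun i => decide (PySem.Int.mod 960 i = 0)) = pvDivs := by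
  decide

-- ===== VERDICT (by name: the statement is the Claim_ definition above) =====
theorem has_common_divisor_spec : Claim_equal_has_common_divisor := by
  intro a b _
  unfold Spec_has_common_divisor has_common_divisor has_common_divisor_alt
  rw [pvGcdB_val, pvLoopA_eq_filter, pvLoopB_eq_filter, pvFilterA]
  norm_num [pvFilterB]
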